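-- pv_equiv track=rewrite | github.com/Starkiller13/big_data_homeworks | big_data_hw1/G33HW1.py | map4
-- ===== SOURCE A (Python) =====
-- def map4(data):
--     pairs_dict={}
--     for p in data[1]:
--         prod, nr = p[0], p[1]
--         if prod not in pairs_dict.keys():
--             pairs_dict[prod] = nr
--         else:
--             if nr > pairs_dict[prod]:
--                 pairs_dict[prod] = nr
--     return [(key, (key, pairs_dict[key])) for key in pairs_dict.keys()]
-- ===== SOURCE B (Python) =====
-- def map4(data):
--     groups = {}
--     for p in data[1]:
--         groups.setdefault(p[0], []).append(p[1])
--     return [(k, (k, max(v))) for k, v in groups.items()]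
-- ===== Notes on version B (the rewrite author's own statement) =====
-- stated objective: alternative
-- what changed: B buckets all values per product into a dict of lists in one branch-free pass, then computes each product's max in a separate reduction pass, instead of A's single loop maintaining a running max with a membership/compare branch.
import Mathlib
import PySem

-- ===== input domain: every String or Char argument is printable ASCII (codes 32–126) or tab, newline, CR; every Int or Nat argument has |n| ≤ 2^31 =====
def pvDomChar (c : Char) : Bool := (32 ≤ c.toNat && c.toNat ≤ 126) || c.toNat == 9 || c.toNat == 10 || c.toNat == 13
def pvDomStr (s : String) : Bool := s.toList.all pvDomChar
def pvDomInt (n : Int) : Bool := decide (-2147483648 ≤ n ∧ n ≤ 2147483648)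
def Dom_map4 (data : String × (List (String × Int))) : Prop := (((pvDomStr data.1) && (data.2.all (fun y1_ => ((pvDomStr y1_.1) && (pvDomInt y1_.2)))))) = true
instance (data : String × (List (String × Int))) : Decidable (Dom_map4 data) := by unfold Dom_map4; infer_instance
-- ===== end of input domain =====

-- B replaces A's running-max loop (membership test + compare branch) by a branch-free
-- bucketing pass into a dict of lists followed by a separate per-key max reduction; same cost.

-- ===== PORT A =====
def map4 (data : String × (List (String × Int))) : List (String × (String × Int)) :=
  let pairs_dict : PySem.Dict String Int :=
    data.2.foldl (fun d p =>
      if d.contains p.1 = false then d.insert p.1 p.2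
      else if p.2 > d.getD p.1 0 then d.insert p.1 p.2   -- key present: getD's default is unreachable
      else d) PySem.Dict.empty
  pairs_dict.keys.map (fun key => (key, (key, pairs_dict.getD key 0)))   -- key present: default unreachable

-- ===== PORT B =====
-- hand port of Python's max() on a nonempty int list (first element, then update when strictly greater);
-- the 0 for [] is unreachable: every bucket list is built nonempty
def pymax (vs : List Int) : Int :=
  match vs with
  | [] => 0
  | x :: rest => rest.foldl (fun a b => if b > a then b else a) x

def map4_alt (data : String × (List (String × Int))) : List (String × (String × Int)) :=
  let groups : PySem.Dict String (List Int) :=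
    data.2.foldl (fun g p => g.modify p.1 [] (fun vs => vs ++ [p.2])) PySem.Dict.empty
  groups.items.map (fun kv => (kv.1, (kv.1, pymax kv.2)))

-- ===== PRECONDITION & SPEC =====
def Spec_map4 (data : String × (List (String × Int))) (out : List (String × (String × Int))) : Prop := out = map4_alt data
instance (data : String × (List (String × Int))) (out : List (String × (String × Int))) : Decidable (Spec_map4 data out) := by unfold Spec_map4; infer_instance

-- ===== CLAIM (what is proved, stated in full; the proofs are below) =====
def Claim_equal_map4 : Prop := ∀ (data : String × (List (String × Int))), Dom_map4 data → Spec_map4 data (map4 data)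

-- ===== LEMMAS AND PROOFS =====

lemma pymax_append (vs : List Int) (x : Int) (h : vs ≠ []) :
    pymax (vs ++ [x]) = if x > pymax vs then x else pymax vs := by
  cases vs with
  | nil => exact absurd rfl h
  | cons y rest => simp [pymax, List.foldl_append]

-- the two loops stay related: A's dict is B's dict with each bucket replaced by its max
lemma fold_rel (l : List (String × Int)) :
    ∀ (d : PySem.Dict String Int) (g : PySem.Dict String (List Int)),
    g.keys.Nodup → (∀ kv ∈ g.items, kv.2 ≠ []) →
    d.items = g.items.map (fun kv => (kv.1, pymax kv.2)) →
    (l.foldl (fun d p =>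
      if d.contains p.1 = false then d.insert p.1 p.2
      else if p.2 > d.getD p.1 0 then d.insert p.1 p.2
      else d) d).items
    = (l.foldl (fun g p => g.modify p.1 [] (fun vs => vs ++ [p.2])) g).items.map
        (fun kv => (kv.1, pymax kv.2)) := by
  induction l with
  | nil => intro d g _ _ h; simpa using h
  | cons p l ih =>
    intro d g hnd hne hitems
    have hkeys : d.keys = g.keys := by
      simp [PySem.Dict.keys, hitems, Function.comp_def]
    have hdnd : d.keys.Nodup := hkeys ▸ hnd
    have hcont : d.contains p.1 = g.contains p.1 := by
      rw [PySem.Dict.contains_eq_decide_mem_keys, PySem.Dict.contains_eq_decide_mem_keys, hkeys]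
    simp only [List.foldl_cons]
    cases hc : g.contains p.1 with
    | false =>
      have hc' : d.contains p.1 = false := hcont.trans hc
      have hstepA : (if d.contains p.1 = false then d.insert p.1 p.2
          else if p.2 > d.getD p.1 0 then d.insert p.1 p.2 else d) = d.insert p.1 p.2 := by
        simp [hc']
      rw [hstepA]
      apply ih
      · rw [PySem.Dict.modify, PySem.Dict.keys_insert_of_not_contains _ _ hc]
        refine List.nodup_append.mpr ⟨hnd, List.nodup_singleton _, ?_⟩
        intro a ha b hb
        rw [List.mem_singleton] at hb
        subst hb
        intro heq
        subst heq
        have := (PySem.Dict.contains_iff_mem_keys (d := g) (k := p.1)).mpr ha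
        simp [hc] at this
      · intro kv hkv
        rw [PySem.Dict.modify, PySem.Dict.items_insert_of_not_contains _ _ hc] at hkv
        rcases List.mem_append.mp hkv with h | h
        · exact hne kv h
        · simp at h; subst h; simp [PySem.Dict.getD_of_not_contains _ _ hc]
      · rw [PySem.Dict.modify, PySem.Dict.items_insert_of_not_contains _ _ hc,
          PySem.Dict.items_insert_of_not_contains _ _ hc', hitems]
        simp [PySem.Dict.getD_of_not_contains _ _ hc, pymax]
    | true =>
      -- the bucket at p.1
      set vs := g.getD p.1 [] with hvs
      have hget : g.get? p.1 = some vs := by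
        have := PySem.Dict.contains_eq_isSome_get? (d := g) (k := p.1)
        rw [hc] at this
        cases hg : g.get? p.1 with
        | none => rw [hg] at this; simp at this
        | some w => simp [PySem.Dict.getD_eq_get?_getD, hvs, hg]
      have hmem : (p.1, vs) ∈ g.items := PySem.Dict.mem_items_of_get?_eq_some _ hget
      have hvsne : vs ≠ [] := hne _ hmem
      have hdgetD : d.getD p.1 0 = pymax vs := by
        have : (p.1, pymax vs) ∈ d.items := by
          rw [hitems]; exact List.mem_map.mpr ⟨(p.1, vs), hmem, rfl⟩
        exact PySem.Dict.getD_of_mem_items _ this hdnd 0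
      have hc' : d.contains p.1 = true := hcont.trans hc
      -- items of B's step: the bucket at p.1 grows by p.2
      have hstepB : (g.modify p.1 [] (fun vs => vs ++ [p.2])).items
          = g.items.map (fun q => if q.1 == p.1 then (p.1, vs ++ [p.2]) else q) := by
        rw [PySem.Dict.modify, PySem.Dict.items_insert_of_contains _ _ hc, ← hvs]
      have hbucket : ∀ q ∈ g.items, q.1 = p.1 → q.2 = vs := by
        intro q hq hq1
        have : g.getD q.1 [] = q.2 := PySem.Dict.getD_of_mem_items _ hq hnd []
        rw [hq1] at this; rw [← this, hvs]
      have hnd' : (g.modify p.1 [] (fun vs => vs ++ [p.2])).keys.Nodup := by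
        rw [PySem.Dict.modify, PySem.Dict.keys_insert_of_contains _ _ hc]; exact hnd
      have hne' : ∀ kv ∈ (g.modify p.1 [] (fun vs => vs ++ [p.2])).items, kv.2 ≠ [] := by
        intro kv hkv
        rw [hstepB] at hkv
        rcases List.mem_map.mp hkv with ⟨q, hq, hq2⟩
        by_cases hqe : q.1 = p.1
        · simp [hqe] at hq2; subst hq2; simp
        · simp [hqe] at hq2; subst hq2; exact hne q hq
      by_cases hgt : p.2 > pymax vs
      · have hstepA : (if d.contains p.1 = false then d.insert p.1 p.2
            else if p.2 > d.getD p.1 0 then d.insert p.1 p.2 else d) = d.insert p.1 p.2 := by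
          simp [hc', hdgetD, hgt]
        rw [hstepA]
        apply ih _ _ hnd' hne'
        rw [PySem.Dict.items_insert_of_contains _ _ hc', hstepB, hitems,
          List.map_map, List.map_map]
        apply List.map_congr_left
        intro q hq
        by_cases hqe : q.1 = p.1
        · simp [Function.comp, hqe, pymax_append vs p.2 hvsne, hgt]
        · simp [Function.comp, hqe]
      · have hstepA : (if d.contains p.1 = false then d.insert p.1 p.2
            else if p.2 > d.getD p.1 0 then d.insert p.1 p.2 else d) = d := by
          simp [hc', hdgetD, hgt]
        rw [hstepA]
        apply ih _ _ hnd' hne'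
        rw [hstepB, hitems, List.map_map]
        apply List.map_congr_left
        intro q hq
        by_cases hqe : q.1 = p.1
        · simp [Function.comp, hqe, pymax_append vs p.2 hvsne, hgt, hbucket q hq hqe]
        · simp [Function.comp, hqe]

-- ===== VERDICT (by name: the statement is the Claim_ definition above) =====
theorem map4_spec : Claim_equal_map4 := by
  intro data _
  unfold Spec_map4 map4 map4_alt
  set gF := data.2.foldl (fun g p => g.modify p.1 [] (fun vs => vs ++ [p.2]))
    (PySem.Dict.empty : PySem.Dict String (List Int)) with hgF
  have hrel := fold_rel data.2 PySem.Dict.empty PySem.Dict.empty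
    (by simp) (by simp [PySem.Dict.empty]) (by simp [PySem.Dict.empty])
  have hgnd : gF.keys.Nodup := by
    rw [hgF]
    exact PySem.Dict.nodup_keys_foldl_modify_key data.2 (fun p => p.1) []
      (fun _ p vs => vs ++ [p.2]) PySem.Dict.empty (by simp)
  set dF := data.2.foldl (fun d p =>
      if d.contains p.1 = false then d.insert p.1 p.2
      else if p.2 > d.getD p.1 0 then d.insert p.1 p.2
      else d) (PySem.Dict.empty : PySem.Dict String Int) with hdF
  have hdnd : dF.keys.Nodup := by
    have : dF.keys = gF.keys := by simp [PySem.Dict.keys, hrel, Function.comp_def, hgF]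
    rw [this]; exact hgnd
  calc dF.keys.map (fun key => (key, (key, dF.getD key 0)))
      = dF.items.map (fun kv => (kv.1, (kv.1, kv.2))) := by
        rw [PySem.Dict.items_eq_map_keys dF hdnd 0, List.map_map]
        simp [Function.comp_def]
    _ = gF.items.map (fun kv => (kv.1, (kv.1, pymax kv.2))) := by
        rw [hrel, List.map_map, hgF]
        simp [Function.comp_def]
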